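-- pv_equiv track=rewrite | github.com/conanWinner/Schedule_Project | service/constraints_service.py | min_gap_between_classes
-- ===== SOURCE A (Python) =====
-- def min_gap_between_classes(selected_classes):
--     # khoảng trống giữa các tiết học là nhỏ nhất
--     gaps = 0
--     day_periods = {}
--     for _, (teacher, day, periods, area, room) in selected_classes:
--         if day not in day_periods:
--             day_periods[day] = []
--         day_periods[day].extend(periods)
--
--     for day in day_periods:
--         periods = sorted(set(day_periods[day]))
--         if len(periods) > 1:
--             for i in range(len(periods) - 1):
--                 gaps += periods[i + 1] - periods[i] - 1
--
--     return gaps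
-- ===== SOURCE B (Python) =====
-- def min_gap_between_classes(selected_classes):
--     day_periods = {}
--     for _, (teacher, day, periods, area, room) in selected_classes:
--         day_periods.setdefault(day, []).extend(periods)
--     gaps = 0
--     for lst in day_periods.values():
--         s = set(lst)
--         if len(s) > 1:
--             gaps += max(s) - min(s) - (len(s) - 1)
--     return gaps
-- ===== Notes on version B (the rewrite author's own statement) =====
-- stated objective: alternative
-- what changed: Per day the gap total is computed as max - min - (distinct count - 1) directly from the set (telescoping identity), replacing A's sort and adjacent-difference scan.
import Mathlib
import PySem

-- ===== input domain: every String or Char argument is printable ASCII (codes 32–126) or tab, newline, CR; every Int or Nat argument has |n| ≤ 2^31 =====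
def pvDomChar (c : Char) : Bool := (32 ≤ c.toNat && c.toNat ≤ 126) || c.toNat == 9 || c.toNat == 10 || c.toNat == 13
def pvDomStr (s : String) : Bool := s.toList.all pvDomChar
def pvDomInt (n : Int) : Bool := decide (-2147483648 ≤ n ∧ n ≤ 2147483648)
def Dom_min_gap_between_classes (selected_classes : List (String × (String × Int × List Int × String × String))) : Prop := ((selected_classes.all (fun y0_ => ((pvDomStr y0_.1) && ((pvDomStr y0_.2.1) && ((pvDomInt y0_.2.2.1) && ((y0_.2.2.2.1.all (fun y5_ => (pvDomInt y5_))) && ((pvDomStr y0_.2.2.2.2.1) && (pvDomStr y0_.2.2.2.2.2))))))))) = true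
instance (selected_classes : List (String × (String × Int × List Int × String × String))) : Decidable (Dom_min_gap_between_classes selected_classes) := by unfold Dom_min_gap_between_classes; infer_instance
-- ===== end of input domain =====

-- ===== PORT A =====
-- A: group periods per day in a dict, then per day sort the distinct periods and sum adjacent differences minus one.
def min_gap_between_classes (selected_classes : List (String × (String × Int × List Int × String × String))) : Int :=
  let day_periods : PySem.Dict Int (List Int) :=
    selected_classes.foldl (fun d c => d.modify c.2.2.1 [] (· ++ c.2.2.2.1)) PySem.Dict.empty
  day_periods.keys.foldl (fun gaps day =>
    let periods := PySem.List.sorted (PySem.Set.ofList (day_periods.getD day [])) (fun x => x) false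
    if (periods.length : Int) > 1 then
      (PySem.List.pyRange 0 ((periods.length : Int) - 1) 1).foldl
        (fun g i => g + (PySem.List.pyGetD periods (i + 1) 0 - PySem.List.pyGetD periods i 0 - 1)) gaps
    else gaps) 0

-- ===== PORT B =====
-- B: same grouping dict; per day the gap total is max - min - (distinct count - 1), no sort.
def min_gap_between_classes_alt (selected_classes : List (String × (String × Int × List Int × String × String))) : Int :=
  let day_periods : PySem.Dict Int (List Int) :=
    selected_classes.foldl (fun d c => d.modify c.2.2.1 [] (· ++ c.2.2.2.1)) PySem.Dict.empty
  day_periods.values.foldl (fun gaps lst =>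
    let s : PySem.Set Int := PySem.Set.ofList lst
    if (s.length : Int) > 1 then
      gaps + ((PySem.List.max? s (fun x => x)).getD 0 - (PySem.List.min? s (fun x => x)).getD 0 - ((s.length : Int) - 1))
    else gaps) 0

-- ===== PRECONDITION & SPEC =====
def Spec_min_gap_between_classes (selected_classes : List (String × (String × Int × List Int × String × String))) (out : Int) : Prop := out = min_gap_between_classes_alt selected_classes
instance (selected_classes : List (String × (String × Int × List Int × String × String))) (out : Int) : Decidable (Spec_min_gap_between_classes selected_classes out) := by unfold Spec_min_gap_between_classes; infer_instance

-- ===== CLAIM (what is proved, stated in full; the proofs are below) =====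
def Claim_equal_min_gap_between_classes : Prop := ∀ (selected_classes : List (String × (String × Int × List Int × String × String))), Dom_min_gap_between_classes selected_classes → Spec_min_gap_between_classes selected_classes (min_gap_between_classes selected_classes)

-- ===== LEMMAS AND PROOFS =====

-- Telescoping: the adjacent-difference sum over the first m steps collapses.
lemma pvTelescope (ps : List Int) :
    ∀ (m : Nat), m < ps.length → ∀ g : Int,
      (List.range m).foldl (fun g k => g + (ps.getD (k + 1) 0 - ps.getD k 0 - 1)) g
        = g + (ps.getD m 0 - ps.getD 0 0 - m) := by
  intro m
  induction m with
  | zero => intro _ g; simp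
  | succ m ih =>
      intro hm g
      rw [List.range_succ, List.foldl_append, ih (by omega) g]
      simp only [List.foldl]
      push_cast
      ring

-- In a strictly increasing list every member is ≤ the last and ≥ the first element.
lemma pvMem_bounds_of_pairwise_lt (l : List Int) (h : l.Pairwise (· < ·)) (x : Int)
    (hx : x ∈ l) (hl : 0 < l.length) :
    l.getD 0 0 ≤ x ∧ x ≤ l.getD (l.length - 1) 0 := by
  obtain ⟨j, hj, rfl⟩ := List.mem_iff_getElem.mp hx
  have hpg := List.pairwise_iff_getElem.mp h
  rw [List.getD_eq_getElem l 0 hl, List.getD_eq_getElem l 0 (by omega)]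
  constructor
  · rcases Nat.eq_zero_or_pos j with h0 | h0
    · subst h0; exact le_refl _
    · exact le_of_lt (hpg 0 j hl hj h0)
  · rcases Nat.lt_or_ge j (l.length - 1) with hlt | hge
    · exact le_of_lt (hpg j (l.length - 1) hj (by omega) hlt)
    · have : j = l.length - 1 := by omega
      subst this; exact le_refl _

-- Per-day step: A's sort-and-scan equals B's max-min closed form on the same period list.
lemma pvInner_eq (lst : List Int) (g : Int) :
    (if ((PySem.List.sorted (PySem.Set.ofList lst) (fun x => x) false).length : Int) > 1 then
       (PySem.List.pyRange 0 (((PySem.List.sorted (PySem.Set.ofList lst) (fun x => x) false).length : Int) - 1) 1).foldl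
         (fun g i => g + (PySem.List.pyGetD (PySem.List.sorted (PySem.Set.ofList lst) (fun x => x) false) (i + 1) 0
                          - PySem.List.pyGetD (PySem.List.sorted (PySem.Set.ofList lst) (fun x => x) false) i 0 - 1)) g
     else g)
    =
    (if (((PySem.Set.ofList lst : PySem.Set Int).length : Int) > 1) then
       g + ((PySem.List.max? (PySem.Set.ofList lst) (fun x => x)).getD 0
            - (PySem.List.min? (PySem.Set.ofList lst) (fun x => x)).getD 0
            - (((PySem.Set.ofList lst : PySem.Set Int).length : Int) - 1))
     else g) := by
  set s : PySem.Set Int := PySem.Set.ofList lst with hs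
  set ps := PySem.List.sorted s (fun x => x) false with hps
  have hperm : ps.Perm s := PySem.List.sorted_perm s (fun x => x) false
  have hlen : ps.length = s.length := hperm.length_eq
  rw [hlen]
  by_cases h1 : (s.length : Int) > 1
  · rw [if_pos h1, if_pos h1]
    have hpair : ps.Pairwise (· < ·) := PySem.List.sorted_ofList_pairwise_lt lst
    have hlen2 : 2 ≤ s.length := by omega
    have hplen : 0 < ps.length := by omega
    -- rewrite the pyRange fold into a List.range fold on Nat indices
    have hcast : (s.length : Int) - 1 = ((s.length - 1 : Nat) : Int) := by omega
    rw [hcast, PySem.List.pyRange_zero_natCast, List.foldl_map]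
    have hbody : (fun (g : Int) (k : Nat) =>
          g + (PySem.List.pyGetD ps ((k : Int) + 1) 0 - PySem.List.pyGetD ps (k : Int) 0 - 1))
        = fun g k => g + (ps.getD (k + 1) 0 - ps.getD k 0 - 1) := by
      funext g k
      have : ((k : Int) + 1) = ((k + 1 : Nat) : Int) := by push_cast; ring
      rw [this, PySem.List.pyGetD_natCast, PySem.List.pyGetD_natCast]
    rw [hbody, pvTelescope ps (s.length - 1) (by omega) g]
    -- identify max and min with the last and first sorted elements
    obtain ⟨mx, hmx⟩ : ∃ mx, PySem.List.max? s (fun x => x) = some mx := by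
      cases hmax : PySem.List.max? s (fun x => x) with
      | none =>
          have := (PySem.List.max?_eq_none_iff s (fun x => x)).mp hmax
          simp [this] at hlen2
      | some m => exact ⟨m, rfl⟩
    obtain ⟨mn, hmn⟩ : ∃ mn, PySem.List.min? s (fun x => x) = some mn := by
      cases hmin : PySem.List.min? s (fun x => x) with
      | none =>
          have := (PySem.List.min?_eq_none_iff s (fun x => x)).mp hmin
          simp [this] at hlen2
      | some m => exact ⟨m, rfl⟩
    have hmx_mem : mx ∈ ps := hperm.mem_iff.mpr (PySem.List.max?_mem hmx)
    have hmn_mem : mn ∈ ps := hperm.mem_iff.mpr (PySem.List.min?_mem hmn)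
    have hlast_mem : ps.getD (ps.length - 1) 0 ∈ ps := by
      rw [List.getD_eq_getElem ps 0 (by omega)]; exact List.getElem_mem _
    have hhead_mem : ps.getD 0 0 ∈ ps := by
      rw [List.getD_eq_getElem ps 0 hplen]; exact List.getElem_mem _
    have hmx_eq : mx = ps.getD (ps.length - 1) 0 := by
      have h1' := (pvMem_bounds_of_pairwise_lt ps hpair mx hmx_mem hplen).2
      have h2' := PySem.List.max?_isMax hmx _ (hperm.mem_iff.mp hlast_mem)
      exact le_antisymm h1' h2'
    have hmn_eq : mn = ps.getD 0 0 := by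
      have h1' := (pvMem_bounds_of_pairwise_lt ps hpair mn hmn_mem hplen).1
      have h2' := PySem.List.min?_isMin hmn _ (hperm.mem_iff.mp hhead_mem)
      exact le_antisymm h2' h1'
    rw [hmx, hmn]
    simp only [Option.getD_some]
    rw [hlen] at hmx_eq
    rw [hmx_eq, hmn_eq]
  · rw [if_neg h1, if_neg h1]

-- ===== VERDICT (by name: the statement is the Claim_ definition above) =====
theorem min_gap_between_classes_spec : Claim_equal_min_gap_between_classes := by
  intro scs _
  unfold Spec_min_gap_between_classes min_gap_between_classes min_gap_between_classes_alt
  simp only []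
  set dp : PySem.Dict Int (List Int) :=
    scs.foldl (fun d c => d.modify c.2.2.1 [] (· ++ c.2.2.2.1)) PySem.Dict.empty with hdp
  have hnd : dp.keys.Nodup := by
    rw [hdp]
    exact PySem.Dict.nodup_keys_foldl_modify_key scs (fun c => c.2.2.1) []
      (fun d c v => v ++ c.2.2.2.1) PySem.Dict.empty (by simp [PySem.Dict.empty, PySem.Dict.keys])
  rw [PySem.Dict.values_eq_map_keys dp hnd [], List.foldl_map]
  congr 1
  funext g day
  exact pvInner_eq (dp.getD day []) g
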